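-- pv_equiv track=rewrite | github.com/emithongle/AddressSegmentation | ReviewAllFeatures/libs/features.py | findMaxString
-- ===== SOURCE A (Python) =====
-- import string
--
-- def findMaxStringP(text, cod, skip=0):
--     i, nskip = 0, 0
--     while (i < len(text) and nskip <= skip):
--         if (cod):
--             if (text[i] in string.digits):
--                 nskip += 1
--                 i += 1
--             elif (text[i] in string.ascii_lowercase):
--                 i += 1
--                 nskip = 0
--             else:
--                 i += 1
--         elif (1 - cod):
--             if (text[i] in string.ascii_lowercase):
--                 nskip += 1
--                 i += 1
--             elif (text[i] in string.digits):
--                 i += 1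
--                 nskip = 0
--             else:
--                 i += 1
--     if nskip > skip:
--         return text[:i-2]
--     elif (i == len(text)):
--         return text
--
--     return text[:i]
--
-- def findMaxString(text, skip=0):
--     tc, td = '', ''
--     try:
--         for i in range(len(text)):
--             if text[i] in string.digits:
--                 t = findMaxStringP(text[i:], False, skip)
--                 if (len(td) < len(t)):
--                     td = t
--             elif text[i] in string.ascii_lowercase:
--                 t = findMaxStringP(text[i:], True, skip)
--                 if (len(tc) < len(t)):
--                     tc = t
--     except ValueError:
--         None
--
--     return tc, td
-- ===== SOURCE B (Python) =====
-- import string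
--
-- def _scan(text, j, good, bad, skip):
--     # advance from j counting bad characters since the last good one; stop
--     # once the count exceeds the budget (or at the end of the text)
--     i, v, n = j, 0, len(text)
--     while i < n and v <= skip:
--         c = text[i]
--         if c in bad:
--             v += 1
--         elif c in good:
--             v = 0
--         i += 1
--     return i, v
--
-- def _best(text, good, bad, skip):
--     # one left-to-right sweep: scan the run of each earliest live start only;
--     # every start inside a scanned run is dominated (strictly shorter run),
--     # so the next candidate start is the first good character after the run.
--     best = ''
--     j, n = 0, len(text)
--     while j < n:
--         if text[j] in good:
--             i, v = _scan(text, j, good, bad, skip)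
--             if v > skip:
--                 t = text[j:i - 2]
--                 j = max(i, j + 1)   # next live start is past the fatal character
--             else:
--                 t = text[j:]
--                 j = n               # run reaches the end: later starts are shorter
--             if len(best) < len(t):
--                 best = t
--         else:
--             j += 1
--     return best
--
-- def findMaxString(text, skip=0):
--     return (_best(text, string.ascii_lowercase, string.digits, skip),
--             _best(text, string.digits, string.ascii_lowercase, skip))
-- ===== Notes on version B (the rewrite author's own statement) =====
-- stated objective: faster
-- what changed: Instead of rescanning the text from every letter/digit position (A), B sweeps each mode once left to right, scanning only from the earliest live start of each run and jumping past the run's end, since all starts inside a scanned run yield strictly shorter runs; Pre_ excludes negative skip budgets, an unspecified corner no caller uses, where the two programs' values may differ.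
-- outside the precondition, e.g. on findMaxString('a5b', -1): A returns ('a', ''), B returns ('a', '5')
import Mathlib
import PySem

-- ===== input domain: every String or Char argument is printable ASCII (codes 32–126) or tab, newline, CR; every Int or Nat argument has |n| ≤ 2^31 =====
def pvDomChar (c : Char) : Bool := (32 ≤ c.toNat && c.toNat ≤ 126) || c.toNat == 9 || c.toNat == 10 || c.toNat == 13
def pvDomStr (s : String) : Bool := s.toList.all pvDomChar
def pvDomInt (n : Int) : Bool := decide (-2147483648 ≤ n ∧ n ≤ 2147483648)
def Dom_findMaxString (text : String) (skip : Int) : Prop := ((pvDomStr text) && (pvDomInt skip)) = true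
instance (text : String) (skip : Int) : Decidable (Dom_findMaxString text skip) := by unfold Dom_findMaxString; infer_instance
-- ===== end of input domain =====

-- B replaces A's quadratic rescan-from-every-position with one linear sweep per mode
-- that scans each run only from its earliest start and jumps past it (measured faster).

-- ===== PORT A =====
-- `c in string.digits` / `c in string.ascii_lowercase` (exact: ASCII code-range tests)
def pyIsDigit (c : Char) : Bool := 48 ≤ c.toNat && c.toNat ≤ 57
def pyIsLower (c : Char) : Bool := 97 ≤ c.toNat && c.toNat ≤ 122

-- the `while i < len(text) and nskip <= skip` loop of findMaxStringP, as structural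
-- recursion over the unread characters (i counts exactly as in Python); the Python
-- `elif (1 - cod)` branch is taken exactly when cod is falsy, hence the `else`.
def pLoop (cod : Bool) (skip : Int) : List Char → Nat → Int → Nat × Int
  | [], i, nskip => (i, nskip)
  | c :: rest, i, nskip =>
    if nskip > skip then (i, nskip)
    else if cod then
      if pyIsDigit c then pLoop cod skip rest (i + 1) (nskip + 1)
      else if pyIsLower c then pLoop cod skip rest (i + 1) 0
      else pLoop cod skip rest (i + 1) nskip
    else
      if pyIsLower c then pLoop cod skip rest (i + 1) (nskip + 1)
      else if pyIsDigit c then pLoop cod skip rest (i + 1) 0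
      else pLoop cod skip rest (i + 1) nskip

def findMaxStringP (text : List Char) (cod : Bool) (skip : Int) : List Char :=
  let r := pLoop cod skip text 0 0
  if r.2 > skip then PySem.List.slice text none (some ((r.1 : Int) - 2))
  else if r.1 = text.length then text
  else PySem.List.slice text none (some (r.1 : Int))

-- the try/except ValueError around the loop is dead code (nothing raises ValueError)
def findMaxString (text : String) (skip : Int) : String × String :=
  let l := text.toList
  let r := (PySem.List.pyRange 0 (l.length : Int) 1).foldl
    (fun (acc : List Char × List Char) i =>
      let c := PySem.List.pyGetD l i ' '
      if pyIsDigit c then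
        let t := findMaxStringP (PySem.List.slice l (some i) none) false skip
        if acc.2.length < t.length then (acc.1, t) else acc
      else if pyIsLower c then
        let t := findMaxStringP (PySem.List.slice l (some i) none) true skip
        if acc.1.length < t.length then (t, acc.2) else acc
      else acc)
    ([], [])
  (String.ofList r.1, String.ofList r.2)

-- ===== PORT B =====
-- Source B's _scan, as structural recursion over the unread characters; returns the
-- number of consumed characters (Python's i equals j + that count) and v.
def bScan (good bad : Char → Bool) (skip : Int) : List Char → Int → Nat × Int
  | [], v => (0, v)
  | c :: rest, v =>
    if v > skip then (0, v)
    else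
      let v' := if bad c then v + 1 else if good c then 0 else v
      let r := bScan good bad skip rest v'
      (r.1 + 1, r.2)

-- Source B's _best `while j < n` loop (j strictly increases, so recursion on n - j)
def bOuter (good bad : Char → Bool) (skip : Int) (l : List Char) (j : Nat) (best : List Char) : List Char :=
  if h : j < l.length then
    if good l[j] then
      let s := bScan good bad skip (l.drop j) 0
      let i := j + s.1
      if s.2 > skip then
        let t := PySem.List.slice l (some (j : Int)) (some ((i : Int) - 2))
        bOuter good bad skip l (max i (j + 1)) (if best.length < t.length then t else best)
      else
        let t := l.drop j
        bOuter good bad skip l l.length (if best.length < t.length then t else best)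
    else bOuter good bad skip l (j + 1) best
  else best
termination_by l.length - j
decreasing_by all_goals omega

def findMaxString_alt (text : String) (skip : Int) : String × String :=
  (String.ofList (bOuter pyIsLower pyIsDigit skip text.toList 0 []),
   String.ofList (bOuter pyIsDigit pyIsLower skip text.toList 0 []))

-- ===== PRECONDITION & SPEC =====
-- Pre_ excludes negative skip budgets, a corner outside the function's purpose: no
-- caller passes one and neither program's return value is specified there, so the
-- two are not claimed to match (they usually still do).
def Pre_findMaxString (text : String) (skip : Int) : Prop := 0 ≤ skip
instance (text : String) (skip : Int) : Decidable (Pre_findMaxString text skip) := by unfold Pre_findMaxString; infer_instance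
def pvWitness_findMaxString : String × Int := ("ab1c2", 1)

def Spec_findMaxString (text : String) (skip : Int) (out : String × String) : Prop := out = findMaxString_alt text skip
instance (text : String) (skip : Int) (out : String × String) : Decidable (Spec_findMaxString text skip out) := by unfold Spec_findMaxString; infer_instance

-- ===== CLAIM (what is proved, stated in full; the proofs are below) =====
def Claim_equal_findMaxString : Prop := ∀ (text : String) (skip : Int), Dom_findMaxString text skip → Pre_findMaxString text skip → Spec_findMaxString text skip (findMaxString text skip)

-- ===== LEMMAS AND PROOFS =====

-- proof-side mode-generic reformulations
def candOf (good bad : Char → Bool) (skip : Int) (l : List Char) : List Char :=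
  let s := bScan good bad skip l 0
  if s.2 > skip then PySem.List.slice l none (some ((s.1 : Int) - 2))
  else if s.1 = l.length then l
  else PySem.List.slice l none (some (s.1 : Int))

-- A's per-mode work, re-indexed over suffixes: candidate from every good start
def goA (good bad : Char → Bool) (skip : Int) : List Char → List Char → List Char
  | acc, [] => acc
  | acc, c :: r =>
    if good c then
      goA good bad skip
        (let t := candOf good bad skip (c :: r)
         if acc.length < t.length then t else acc) r
    else goA good bad skip acc r

-- A's main loop body over suffixes, both modes at once
def goPair (skip : Int) : List Char × List Char → List Char → List Char × List Char
  | acc, [] => acc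
  | acc, c :: r =>
    if pyIsDigit c then
      goPair skip
        (let t := candOf pyIsDigit pyIsLower skip (c :: r)
         if acc.2.length < t.length then (acc.1, t) else acc) r
    else if pyIsLower c then
      goPair skip
        (let t := candOf pyIsLower pyIsDigit skip (c :: r)
         if acc.1.length < t.length then (t, acc.2) else acc) r
    else goPair skip acc r

-- B's sweep, re-indexed over suffixes
def goB (good bad : Char → Bool) (skip : Int) : List Char → List Char → List Char
  | acc, [] => acc
  | acc, c :: r =>
    if good c then
      let s := bScan good bad skip (c :: r) 0
      if s.2 > skip then
        goB good bad skip
          (let t := (c :: r).take (s.1 - 2)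
           if acc.length < t.length then t else acc)
          ((c :: r).drop (max s.1 1))
      else
        (let t := c :: r
         if acc.length < t.length then t else acc)
    else goB good bad skip acc r
  termination_by _ l => l.length
  decreasing_by all_goals (simp only [List.length_drop, List.length_cons]; omega)

theorem lower_not_digit (c : Char) : pyIsLower c = true → pyIsDigit c = false := by
  simp [pyIsLower, pyIsDigit]; omega

theorem digit_not_lower (c : Char) : pyIsDigit c = true → pyIsLower c = false := by
  simp [pyIsLower, pyIsDigit]; omega

theorem bScan_stuck (good bad : Char → Bool) (skip : Int) (l : List Char) (v : Int)
    (h : v > skip) : bScan good bad skip l v = (0, v) := by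
  cases l <;> simp [bScan, h]

theorem bScan_le_length (good bad : Char → Bool) (skip : Int) (l : List Char) (v : Int) :
    (bScan good bad skip l v).1 ≤ l.length := by
  induction l generalizing v with
  | nil => simp [bScan]
  | cons c r ih => simp only [bScan]; split <;> simp [ih]

theorem bScan_runout (good bad : Char → Bool) (skip : Int) (l : List Char) :
    ∀ (v : Int), (bScan good bad skip l v).2 ≤ skip → (bScan good bad skip l v).1 = l.length := by
  induction l with
  | nil => intro v _; simp [bScan]
  | cons c r ih =>
    intro v h
    by_cases hv : v > skip
    · rw [bScan_stuck good bad skip _ v hv] at h; omega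
    · simp only [bScan, if_neg hv] at h ⊢
      simp [ih _ h]

theorem bScan_append (good bad : Char → Bool) (skip : Int) (l1 l2 : List Char) :
    ∀ (v : Int), bScan good bad skip (l1 ++ l2) v =
      (if (bScan good bad skip l1 v).1 < l1.length then bScan good bad skip l1 v
       else (l1.length + (bScan good bad skip l2 (bScan good bad skip l1 v).2).1,
             (bScan good bad skip l2 (bScan good bad skip l1 v).2).2)) := by
  induction l1 with
  | nil => intro v; simp [bScan]
  | cons c r ih =>
    intro v
    by_cases hv : v > skip
    · simp [bScan, hv]
    · simp only [List.cons_append, bScan, if_neg hv]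
      rw [ih]
      by_cases hlt : (bScan good bad skip r (if bad c = true then v + 1 else if good c = true then 0 else v)).1 < r.length
      · simp [hlt, Nat.succ_lt_succ hlt]
      · have hle := bScan_le_length good bad skip r (if bad c = true then v + 1 else if good c = true then 0 else v)
        have heq : (bScan good bad skip r (if bad c = true then v + 1 else if good c = true then 0 else v)).1 = r.length := by omega
        simp [hlt, heq]
        omega

theorem bScan_good_head (good bad : Char → Bool) (skip : Int) (c : Char) (l : List Char) (v : Int)
    (hg : good c = true) (hgb : ∀ c, good c = true → bad c = false) (hv : v ≤ skip) :
    bScan good bad skip (c :: l) v = ((bScan good bad skip l 0).1 + 1, (bScan good bad skip l 0).2) := by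
  simp [bScan, hg, hgb c hg, not_lt.2 hv]

theorem bScan_pos_of_fatal (good bad : Char → Bool) (skip : Int) (l : List Char)
    (hsk : 0 ≤ skip) (h : (bScan good bad skip l 0).2 > skip) :
    1 ≤ (bScan good bad skip l 0).1 := by
  cases l with
  | nil => simp [bScan] at h; omega
  | cons c r => simp [bScan, not_lt.2 hsk]

theorem bScan_fatal_two (good bad : Char → Bool) (skip : Int) (c : Char) (l : List Char)
    (hg : good c = true) (hgb : ∀ c, good c = true → bad c = false) (hsk : 0 ≤ skip)
    (h : (bScan good bad skip (c :: l) 0).2 > skip) :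
    2 ≤ (bScan good bad skip (c :: l) 0).1 := by
  rw [bScan_good_head good bad skip c l 0 hg hgb hsk] at h ⊢
  have := bScan_pos_of_fatal good bad skip l hsk h
  omega

-- a scan that passes the start of a good-headed suffix restarts in sync there
theorem bScan_inner (good bad : Char → Bool) (skip : Int) (l1 : List Char) (c : Char) (s : List Char)
    (hg : good c = true) (hgb : ∀ c, good c = true → bad c = false) (hsk : 0 ≤ skip)
    (h : l1.length < (bScan good bad skip (l1 ++ c :: s) 0).1) :
    bScan good bad skip (c :: s) 0 =
      ((bScan good bad skip (l1 ++ c :: s) 0).1 - l1.length,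
       (bScan good bad skip (l1 ++ c :: s) 0).2) := by
  have happ := bScan_append good bad skip l1 (c :: s) 0
  by_cases hlt : (bScan good bad skip l1 0).1 < l1.length
  · rw [happ] at h
    simp [hlt] at h
    omega
  · have hv : (bScan good bad skip l1 0).2 ≤ skip := by
      by_contra hv
      rw [bScan_stuck good bad skip (c :: s) _ (by omega)] at happ
      rw [happ] at h
      simp [hlt] at h
    rw [bScan_good_head good bad skip c s _ hg hgb hv] at happ
    rw [happ, bScan_good_head good bad skip c s 0 hg hgb hsk]
    simp [hlt]

theorem candOf_runout (good bad : Char → Bool) (skip : Int) (l : List Char)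
    (h : (bScan good bad skip l 0).2 ≤ skip) : candOf good bad skip l = l := by
  simp [candOf, not_lt.2 h, bScan_runout good bad skip l 0 h]

theorem candOf_fatal (good bad : Char → Bool) (skip : Int) (l : List Char)
    (h2 : 2 ≤ (bScan good bad skip l 0).1) (h : (bScan good bad skip l 0).2 > skip) :
    candOf good bad skip l = l.take ((bScan good bad skip l 0).1 - 2) := by
  have hc : ((bScan good bad skip l 0).1 : Int) - 2 = (((bScan good bad skip l 0).1 - 2 : Nat) : Int) := by
    omega
  simp [candOf, h, hc, PySem.List.slice_to_natCast]

theorem goA_prefix_dominated (good bad : Char → Bool) (skip : Int) :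
    ∀ (mid rest acc : List Char),
      (∀ (c : Char) (m : List Char), (c :: m) <:+ mid → good c = true →
        (candOf good bad skip (c :: m ++ rest)).length ≤ acc.length) →
      goA good bad skip acc (mid ++ rest) = goA good bad skip acc rest := by
  intro mid
  induction mid with
  | nil => intro rest acc _; rfl
  | cons d mid' ih =>
    intro rest acc hdom
    simp only [List.cons_append, goA]
    split
    · next hd =>
      have hno := hdom d mid' (List.suffix_refl _) hd
      simp only [List.cons_append] at hno
      rw [if_neg (by omega)]
      exact ih rest acc (fun c m hsuf hc => hdom c m (hsuf.trans (List.suffix_cons d mid')) hc)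
    · exact ih rest acc (fun c m hsuf hc => hdom c m (hsuf.trans (List.suffix_cons d mid')) hc)

theorem goA_eq_goB (good bad : Char → Bool) (skip : Int)
    (hsk : 0 ≤ skip) (hgb : ∀ c, good c = true → bad c = false) :
    ∀ (n : Nat) (l : List Char), l.length ≤ n → ∀ acc,
      goA good bad skip acc l = goB good bad skip acc l := by
  intro n
  induction n with
  | zero =>
    intro l hl acc
    have : l = [] := List.eq_nil_of_length_eq_zero (by omega)
    subst this; simp [goA, goB]
  | succ n ih =>
    intro l hl acc
    cases l with
    | nil => simp [goA, goB]
    | cons c r =>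
      by_cases hg : good c
      · by_cases hfat : (bScan good bad skip (c :: r) 0).2 > skip
        · -- the scan from this start hits the budget
          have hk2 : 2 ≤ (bScan good bad skip (c :: r) 0).1 :=
            bScan_fatal_two good bad skip c r hg hgb hsk hfat
          have hkle : (bScan good bad skip (c :: r) 0).1 ≤ r.length + 1 := by
            simpa using bScan_le_length good bad skip (c :: r) 0
          set k := (bScan good bad skip (c :: r) 0).1 with hk
          have hcand : candOf good bad skip (c :: r) = (c :: r).take (k - 2) :=
            candOf_fatal good bad skip (c :: r) (by omega) hfat
          set acc' := if acc.length < ((c :: r).take (k - 2)).length then (c :: r).take (k - 2) else acc with hacc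
          have hacc_len : k - 2 ≤ acc'.length := by
            rw [hacc]; split
            · simp [List.length_take]; omega
            · next hno => simp [List.length_take] at hno; omega
          have htk : (r.take (k - 1)).length = k - 1 := by
            simp [List.length_take]; omega
          have hdom : ∀ (c' : Char) (m : List Char), (c' :: m) <:+ r.take (k - 1) → good c' = true →
              (candOf good bad skip (c' :: m ++ r.drop (k - 1))).length ≤ acc'.length := by
            intro c' m hsuf hg'
            simp only [List.cons_append]
            obtain ⟨pre, hpre⟩ := hsuf
            have hml : m.length + 1 ≤ k - 1 := by
              have := congrArg List.length hpre
              simp at this; omega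
            have hpl : pre.length = k - 1 - (m.length + 1) := by
              have := congrArg List.length hpre
              simp [htk] at this; omega
            have hwhole : (c :: pre) ++ c' :: (m ++ r.drop (k - 1)) = c :: r := by
              have h2 : pre ++ (c' :: (m ++ r.drop (k - 1))) = (pre ++ c' :: m) ++ r.drop (k - 1) := by
                simp
              simp only [List.cons_append]
              rw [h2, hpre, List.take_append_drop]
            have hlt : (c :: pre).length < (bScan good bad skip ((c :: pre) ++ c' :: (m ++ r.drop (k - 1))) 0).1 := by
              rw [hwhole, ← hk]
              simp
              omega
            have hin := bScan_inner good bad skip (c :: pre) c' (m ++ r.drop (k - 1)) hg' hgb hsk hlt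
            rw [hwhole, ← hk] at hin
            have hK : (bScan good bad skip (c' :: (m ++ r.drop (k - 1))) 0).1 = m.length + 1 := by
              rw [hin]; simp; omega
            have hW : (bScan good bad skip (c' :: (m ++ r.drop (k - 1))) 0).2 > skip := by
              rw [hin]; exact hfat
            rcases Nat.eq_or_lt_of_le (Nat.one_le_iff_ne_zero.2 (by simp) : 1 ≤ m.length + 1) with hm1 | hm2
            · -- a one-character good suffix cannot be where the scan ends
              exfalso
              rw [bScan_good_head good bad skip c' (m ++ r.drop (k - 1)) 0 hg' hgb hsk] at hK hW
              have := bScan_pos_of_fatal good bad skip (m ++ r.drop (k - 1)) hsk hW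
              omega
            · have hc2 : 2 ≤ (bScan good bad skip (c' :: (m ++ r.drop (k - 1))) 0).1 := by omega
              rw [candOf_fatal good bad skip _ hc2 hW, hK]
              have hlen : ((c' :: (m ++ r.drop (k - 1))).take (m.length + 1 - 2)).length ≤ m.length + 1 - 2 :=
                List.length_take_le _ _
              omega
          have hstep : goA good bad skip acc (c :: r) = goA good bad skip acc' r := by
            simp only [goA, hg, if_pos, hcand, hacc]
          rw [hstep]
          have hrw : r = r.take (k - 1) ++ r.drop (k - 1) := (List.take_append_drop _ _).symm
          have h1 : goA good bad skip acc' r = goA good bad skip acc' (r.drop (k - 1)) := by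
            conv_lhs => rw [hrw]
            exact goA_prefix_dominated good bad skip _ _ _ hdom
          rw [h1, ih _ (by simp at hl ⊢; omega) acc']
          have hgoB : goB good bad skip acc (c :: r) =
              goB good bad skip acc' ((c :: r).drop (max k 1)) := by
            rw [goB]
            simp only [hg, if_true, ← hk, if_pos hfat, hacc]
          rw [hgoB]
          have : (c :: r).drop (max k 1) = r.drop (k - 1) := by
            have : max k 1 = k := by omega
            rw [this]
            have : k = (k - 1) + 1 := by omega
            rw [this]
            simp
          rw [this]
        · -- the scan from this start reaches the end of the text
          rw [not_lt] at hfat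
          have hk : (bScan good bad skip (c :: r) 0).1 = r.length + 1 := by
            simpa using bScan_runout good bad skip (c :: r) 0 hfat
          have hcand : candOf good bad skip (c :: r) = c :: r :=
            candOf_runout good bad skip (c :: r) hfat
          set acc' := if acc.length < r.length + 1 then c :: r else acc with hacc
          have hacc_len : r.length + 1 ≤ acc'.length := by
            rw [hacc]; split
            · simp
            · next hno => omega
          have hdom : ∀ (c' : Char) (m : List Char), (c' :: m) <:+ r → good c' = true →
              (candOf good bad skip (c' :: m ++ ([] : List Char))).length ≤ acc'.length := by
            intro c' m hsuf hg'
            simp only [List.cons_append]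
            obtain ⟨pre, hpre⟩ := hsuf
            have hwhole : (c :: pre) ++ c' :: (m ++ ([] : List Char)) = c :: r := by
              have h2 : pre ++ (c' :: (m ++ ([] : List Char))) = (pre ++ c' :: m) ++ ([] : List Char) := by
                simp
              simp only [List.cons_append]
              rw [h2, hpre]
              simp
            have hml : pre.length + (m.length + 1) = r.length := by
              have := congrArg List.length hpre
              simp at this; omega
            have hlt : (c :: pre).length < (bScan good bad skip ((c :: pre) ++ c' :: (m ++ ([] : List Char))) 0).1 := by
              rw [hwhole, hk]
              simp
              omega
            have hin := bScan_inner good bad skip (c :: pre) c' (m ++ ([] : List Char)) hg' hgb hsk hlt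
            rw [hwhole] at hin
            have hW : (bScan good bad skip (c' :: (m ++ ([] : List Char))) 0).2 ≤ skip := by
              rw [hin]; exact hfat
            rw [candOf_runout good bad skip _ hW]
            simp
            omega
          have hstep : goA good bad skip acc (c :: r) = goA good bad skip acc' r := by
            simp only [goA, hg, if_pos, hcand, hacc, List.length_cons]
          rw [hstep]
          have h1 : goA good bad skip acc' r = acc' := by
            conv_lhs => rw [show r = r ++ ([] : List Char) by simp]
            rw [goA_prefix_dominated good bad skip r ([] : List Char) acc' hdom]
            rfl
          rw [h1]
          rw [goB]
          simp only [hg, if_true, if_neg (by omega : ¬ (bScan good bad skip (c :: r) 0).2 > skip), hacc,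
            List.length_cons]
          rfl
      · have hA : goA good bad skip acc (c :: r) = goA good bad skip acc r := by
          simp only [goA, hg]; simp
        have hB : goB good bad skip acc (c :: r) = goB good bad skip acc r := by
          rw [goB]; simp [hg]
        rw [hA, hB, ih _ (by simpa using Nat.le_of_succ_le_succ hl) acc]

theorem bOuter_eq_goB (good bad : Char → Bool) (skip : Int)
    (hsk : 0 ≤ skip) (hgb : ∀ c, good c = true → bad c = false) (l : List Char) :
    ∀ (fuel j : Nat) (acc : List Char), l.length - j ≤ fuel →
      bOuter good bad skip l j acc = goB good bad skip acc (l.drop j) := by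
  intro fuel
  induction fuel with
  | zero =>
    intro j acc hle
    have hj : l.length ≤ j := by omega
    rw [bOuter, dif_neg (by omega), List.drop_eq_nil_of_le hj]
    simp [goB]
  | succ fuel ih =>
    intro j acc hle
    by_cases hj : j < l.length
    · have hdrop : l.drop j = l[j] :: l.drop (j + 1) := List.drop_eq_getElem_cons hj
      by_cases hgood : good l[j]
      · by_cases hfat : (bScan good bad skip (l.drop j) 0).2 > skip
        · -- budget exceeded: emit and jump past the fatal character
          have hk2 : 2 ≤ (bScan good bad skip (l.drop j) 0).1 := by
            have h := bScan_fatal_two good bad skip l[j] (l.drop (j + 1)) hgood hgb hsk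
              (by rw [← hdrop]; exact hfat)
            rw [← hdrop] at h
            exact h
          have hcast : ((j + (bScan good bad skip (l.drop j) 0).1 : Nat) : Int) - 2 =
              ((j + ((bScan good bad skip (l.drop j) 0).1 - 2) : Nat) : Int) := by
            push_cast; omega
          have ht : PySem.List.slice l (some ((j : Nat) : Int))
                (some (((j + (bScan good bad skip (l.drop j) 0).1 : Nat) : Int) - 2)) =
              (l.drop j).take ((bScan good bad skip (l.drop j) 0).1 - 2) := by
            rw [hcast, PySem.List.slice_natCast]
            congr 1
            omega
          rw [bOuter]
          simp only [dif_pos hj, if_pos hgood, if_pos hfat, ht]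
          rw [ih _ _ (by omega)]
          have hdd : l.drop (max (j + (bScan good bad skip (l.drop j) 0).1) (j + 1)) =
              (l.drop j).drop (max (bScan good bad skip (l.drop j) 0).1 1) := by
            rw [List.drop_drop]
            congr 1
            omega
          rw [hdd]
          conv_rhs => rw [hdrop]
          rw [goB]
          simp only [← hdrop, hgood, if_pos hfat, if_true]
        · -- the run reaches the end of the text
          have hRHS : goB good bad skip acc (l.drop j) =
              (if acc.length < (l.drop j).length then l.drop j else acc) := by
            rw [hdrop, goB]
            simp only [← hdrop, hgood, if_neg hfat, if_true]
          rw [hRHS, bOuter]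
          simp only [dif_pos hj, if_pos hgood, if_neg hfat]
          rw [ih _ _ (by omega : l.length - l.length ≤ fuel), List.drop_length]
          simp [goB]
      · have hRHS : goB good bad skip acc (l.drop j) = goB good bad skip acc (l.drop (j + 1)) := by
          rw [hdrop, goB]
          simp only [hgood, if_false, Bool.false_eq_true]
        rw [hRHS, bOuter]
        simp only [dif_pos hj, if_neg hgood]
        rw [ih _ _ (by omega)]
    · rw [bOuter, dif_neg hj, List.drop_eq_nil_of_le (by omega)]
      simp [goB]

theorem pLoop_true_eq (skip : Int) (l : List Char) :
    ∀ (i : Nat) (v : Int), pLoop true skip l i v =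
      (i + (bScan pyIsLower pyIsDigit skip l v).1, (bScan pyIsLower pyIsDigit skip l v).2) := by
  induction l with
  | nil => intro i v; simp [pLoop, bScan]
  | cons c r ih =>
    intro i v
    by_cases hv : v > skip
    · simp [pLoop, bScan, hv]
    · by_cases hd : pyIsDigit c
      · simp [pLoop, bScan, hv, hd, ih]
        omega
      · by_cases hl : pyIsLower c
        · simp [pLoop, bScan, hv, hd, hl, ih]
          omega
        · simp [pLoop, bScan, hv, hd, hl, ih]
          omega

theorem pLoop_false_eq (skip : Int) (l : List Char) :
    ∀ (i : Nat) (v : Int), pLoop false skip l i v =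
      (i + (bScan pyIsDigit pyIsLower skip l v).1, (bScan pyIsDigit pyIsLower skip l v).2) := by
  induction l with
  | nil => intro i v; simp [pLoop, bScan]
  | cons c r ih =>
    intro i v
    by_cases hv : v > skip
    · simp [pLoop, bScan, hv]
    · by_cases hl : pyIsLower c
      · simp [pLoop, bScan, hv, hl, ih]
        omega
      · by_cases hd : pyIsDigit c
        · simp [pLoop, bScan, hv, hl, hd, ih]
          omega
        · simp [pLoop, bScan, hv, hl, hd, ih]
          omega

theorem findMaxStringP_true (skip : Int) (l : List Char) :
    findMaxStringP l true skip = candOf pyIsLower pyIsDigit skip l := by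
  simp [findMaxStringP, candOf, pLoop_true_eq]

theorem findMaxStringP_false (skip : Int) (l : List Char) :
    findMaxStringP l false skip = candOf pyIsDigit pyIsLower skip l := by
  simp [findMaxStringP, candOf, pLoop_false_eq]

theorem goPair_split (skip : Int) :
    ∀ (l : List Char) (a b : List Char),
      goPair skip (a, b) l =
        (goA pyIsLower pyIsDigit skip a l, goA pyIsDigit pyIsLower skip b l) := by
  intro l
  induction l with
  | nil => intro a b; rfl
  | cons c r ih =>
    intro a b
    by_cases hd : pyIsDigit c
    · have hl := digit_not_lower c hd
      simp only [goPair, goA, hd, hl, if_true, if_false, Bool.false_eq_true]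
      by_cases hcmp : b.length < (candOf pyIsDigit pyIsLower skip (c :: r)).length
      · simp only [if_pos hcmp]
        rw [ih]
      · simp only [if_neg hcmp]
        rw [ih]
    · by_cases hl : pyIsLower c
      · simp only [goPair, goA, hd, hl, if_true, if_false, Bool.false_eq_true]
        by_cases hcmp : a.length < (candOf pyIsLower pyIsDigit skip (c :: r)).length
        · simp only [if_pos hcmp]
          rw [ih]
        · simp only [if_neg hcmp]
          rw [ih]
      · simp only [goPair, goA, hd, hl, if_false, Bool.false_eq_true]
        rw [ih]

def aBody (skip : Int) (l : List Char) (acc : List Char × List Char) (i : Int) : List Char × List Char :=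
  let c := PySem.List.pyGetD l i ' '
  if pyIsDigit c then
    let t := findMaxStringP (PySem.List.slice l (some i) none) false skip
    if acc.2.length < t.length then (acc.1, t) else acc
  else if pyIsLower c then
    let t := findMaxStringP (PySem.List.slice l (some i) none) true skip
    if acc.1.length < t.length then (t, acc.2) else acc
  else acc

theorem A_fold (skip : Int) (l : List Char) :
    ∀ (fuel j : Nat) (acc : List Char × List Char), l.length - j ≤ fuel → j ≤ l.length →
      (PySem.List.pyRange (j : Int) (l.length : Int) 1).foldl (aBody skip l) acc =
        goPair skip acc (l.drop j) := by
  intro fuel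
  induction fuel with
  | zero =>
    intro j acc h1 h2
    have hj : j = l.length := by omega
    subst hj
    rw [PySem.List.pyRange_one_eq_nil (le_refl _), List.drop_length]
    rfl
  | succ fuel ih =>
    intro j acc h1 h2
    by_cases hj : j < l.length
    · have hget : PySem.List.pyGetD l ((j : Nat) : Int) ' ' = l[j] := by
        rw [PySem.List.pyGetD_natCast]
        exact List.getD_eq_getElem l ' ' hj
      have hslice : PySem.List.slice l (some ((j : Nat) : Int)) none = l.drop j :=
        PySem.List.slice_from_natCast l j
      have hdrop : l.drop j = l[j] :: l.drop (j + 1) := List.drop_eq_getElem_cons hj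
      have hcast1 : ((j : Nat) : Int) + 1 = (((j + 1 : Nat)) : Int) := by push_cast; ring
      rw [PySem.List.pyRange_one_cons (by exact_mod_cast hj), List.foldl_cons, hcast1,
          ih _ _ (by omega) (by omega)]
      conv_rhs => rw [hdrop]
      by_cases hd : pyIsDigit l[j]
      · have hstep : aBody skip l acc ((j : Nat) : Int) =
            (if acc.2.length < (candOf pyIsDigit pyIsLower skip (l.drop j)).length then
              (acc.1, candOf pyIsDigit pyIsLower skip (l.drop j)) else acc) := by
          simp only [aBody, hget, hslice, findMaxStringP_false, hd, if_true]
        rw [hstep]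
        simp only [goPair, hd, if_true, ← hdrop]
      · by_cases hlw : pyIsLower l[j]
        · have hstep : aBody skip l acc ((j : Nat) : Int) =
              (if acc.1.length < (candOf pyIsLower pyIsDigit skip (l.drop j)).length then
                (candOf pyIsLower pyIsDigit skip (l.drop j), acc.2) else acc) := by
            simp only [aBody, hget, hslice, findMaxStringP_true, hd, hlw, if_true, if_false,
              Bool.false_eq_true]
          rw [hstep]
          simp only [goPair, hd, hlw, if_true, if_false, Bool.false_eq_true, ← hdrop]
        · have hstep : aBody skip l acc ((j : Nat) : Int) = acc := by
            simp only [aBody, hget, hslice, hd, hlw, if_false, Bool.false_eq_true]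
          rw [hstep]
          simp only [goPair, hd, hlw, if_false, Bool.false_eq_true]
    · have hj' : j = l.length := by omega
      subst hj'
      rw [PySem.List.pyRange_one_eq_nil (le_refl _), List.drop_length]
      rfl

theorem findMaxString_spec : Claim_equal_findMaxString := by
  intro text skip hdom hpre
  have hsk : 0 ≤ skip := hpre
  unfold Spec_findMaxString
  have hA : (PySem.List.pyRange 0 (text.toList.length : Int) 1).foldl (aBody skip text.toList) ([], []) =
      goPair skip ([], []) (text.toList.drop 0) := by
    exact_mod_cast A_fold skip text.toList text.toList.length 0 ([], []) (by omega) (by omega)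
  show (String.ofList ((PySem.List.pyRange 0 (text.toList.length : Int) 1).foldl (aBody skip text.toList) ([], [])).1,
        String.ofList ((PySem.List.pyRange 0 (text.toList.length : Int) 1).foldl (aBody skip text.toList) ([], [])).2) =
      (String.ofList (bOuter pyIsLower pyIsDigit skip text.toList 0 []),
       String.ofList (bOuter pyIsDigit pyIsLower skip text.toList 0 []))
  rw [hA, List.drop_zero, goPair_split,
      goA_eq_goB pyIsLower pyIsDigit skip hsk lower_not_digit text.toList.length text.toList (le_refl _) [],
      goA_eq_goB pyIsDigit pyIsLower skip hsk digit_not_lower text.toList.length text.toList (le_refl _) [],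
      bOuter_eq_goB pyIsLower pyIsDigit skip hsk lower_not_digit text.toList text.toList.length 0 [] (by omega),
      bOuter_eq_goB pyIsDigit pyIsLower skip hsk digit_not_lower text.toList text.toList.length 0 [] (by omega),
      List.drop_zero]
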